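-- pv_equiv track=rewrite | github.com/Ace1928/eidosian_forge | archive_forge/code/func__shape_for_bcast.py | _shape_for_bcast
-- ===== SOURCE A (Python) =====
-- def _shape_for_bcast(shape, target_ndim, new_axes):
--     """Return shape with added axes for broadcasting in ``target_ndim`` dimensions.
--
--     If ``shape`` is shorter than ``target_ndim``, fixed ``1`` entries are inserted
--     into the returned shape, in locations indexed by ``new_axes``. The rest is
--     filled from the back with ``shape`` while possible.
--     """
--     new_shape = [None] * target_ndim
--     if len(shape) < target_ndim:
--         for new_ax in new_axes:
--             new_shape[new_ax] = 1
--     ax_s = 1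
--     for ax in range(1, target_ndim + 1):
--         if new_shape[-ax] is None:
--             try:
--                 new_shape[-ax] = shape[-ax_s]
--                 ax_s += 1
--             except IndexError:
--                 new_shape[-ax] = 1
--     return tuple(new_shape)
-- ===== SOURCE B (Python) =====
-- def _shape_for_bcast(shape, target_ndim, new_axes):
--     """Forward single pass: pre-tabulate marked positions and the real-slot
--     values once, then build the result left-to-right."""
--     if len(shape) < target_ndim:
--         marked = {ax % target_ndim for ax in new_axes}
--     else:
--         marked = set()
--     r = target_ndim - len(marked)
--     if r <= 0:
--         real = []
--     elif r <= len(shape):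
--         real = list(shape[len(shape) - r:])
--     else:
--         real = [1] * (r - len(shape)) + list(shape)
--     it = iter(real)
--     return tuple(1 if i in marked else next(it) for i in range(target_ndim))
-- ===== Notes on version B (the rewrite author's own statement) =====
-- stated objective: alternative
-- what changed: Replaces A's backward index loop with try/except-driven in-place filling of a None template by a forward single pass that first computes the set of normalized marked positions and pre-tabulates the real-slot values (suffix of shape, 1-padded) and consumes them via an iterator.
import Mathlib
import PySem

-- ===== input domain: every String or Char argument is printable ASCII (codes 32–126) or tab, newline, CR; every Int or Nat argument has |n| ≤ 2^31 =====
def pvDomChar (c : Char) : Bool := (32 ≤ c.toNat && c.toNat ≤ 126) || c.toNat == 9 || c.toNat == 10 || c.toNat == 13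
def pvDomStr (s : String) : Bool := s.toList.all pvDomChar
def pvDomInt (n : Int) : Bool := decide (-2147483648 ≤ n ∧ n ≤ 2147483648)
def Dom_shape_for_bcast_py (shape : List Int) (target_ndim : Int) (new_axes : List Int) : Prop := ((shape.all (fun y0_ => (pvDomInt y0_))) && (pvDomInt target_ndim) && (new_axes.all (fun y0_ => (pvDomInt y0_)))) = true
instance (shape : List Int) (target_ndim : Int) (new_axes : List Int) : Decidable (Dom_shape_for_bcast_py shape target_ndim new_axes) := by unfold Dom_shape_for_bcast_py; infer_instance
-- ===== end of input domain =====

-- B replaces A's backward try/except fill of a None template by a forward single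
-- pass over precomputed marked positions and pre-tabulated real-slot values
-- (objective: alternative decomposition, same cost).

-- ===== PORT A =====
-- body of A's backward loop; state is (new_shape, ax_s)
def shapeBcastBodyA (shape : List Int) (p : List (Option Int) × Int) (ax : Int) : List (Option Int) × Int :=
  -- 'new_shape[-ax] is None'; the index -ax is always in range here, so the default is never used
  if PySem.List.pyGetD p.1 (-ax) none = none then
    match PySem.List.pyGet? shape (-p.2) with          -- try: shape[-ax_s]
    | some v => (PySem.List.pySetD p.1 (-ax) (some v), p.2 + 1)
    | none   => (PySem.List.pySetD p.1 (-ax) (some 1), p.2)   -- except IndexError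
  else p

-- 'new_shape = [None]*target_ndim' then the marking loop (guarded by len(shape) < target_ndim)
def shapeBcastMarkA (shape : List Int) (target_ndim : Int) (new_axes : List Int) : List (Option Int) :=
  let new_shape : List (Option Int) := List.replicate target_ndim.toNat none
  if (shape.length : Int) < target_ndim then
    new_axes.foldl (fun ns ax => PySem.List.pySetD ns ax (some 1)) new_shape
  else new_shape

def shape_for_bcast_py (shape : List Int) (target_ndim : Int) (new_axes : List Int) : List Int :=
  ((PySem.List.pyRange 1 (target_ndim + 1) 1).foldl (shapeBcastBodyA shape)
    (shapeBcastMarkA shape target_ndim new_axes, 1)).1.map (fun o => o.getD 1)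
  -- tuple(new_shape): after the loop every entry is some, the .getD default is unused

-- ===== PORT B =====
-- '1 if i in marked else next(it)': consume the real values in order; the [] branch is
-- unreachable (the iterator holds exactly one value per unmarked position)
def shapeBcastGenB (marked : PySem.Set Int) : List Int → List Int → List Int
  | [], _ => []
  | i :: is, real =>
    if PySem.Set.contains marked i then 1 :: shapeBcastGenB marked is real
    else
      match real with
      | v :: rest => v :: shapeBcastGenB marked is rest
      | [] => 1 :: shapeBcastGenB marked is []

-- 'marked = {ax % target_ndim for ax in new_axes}' (guarded) else 'set()'
def shapeBcastMarkedB (shape : List Int) (target_ndim : Int) (new_axes : List Int) : PySem.Set Int :=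
  if (shape.length : Int) < target_ndim then
    PySem.Set.ofList (new_axes.map (fun ax => PySem.Int.mod ax target_ndim))
  else PySem.Set.empty

-- the real-slot values, with r = target_ndim - len(marked)
def shapeBcastRealB (shape : List Int) (target_ndim : Int) (marked : PySem.Set Int) : List Int :=
  if target_ndim - (marked.length : Int) ≤ 0 then []
  else if target_ndim - (marked.length : Int) ≤ (shape.length : Int) then
    PySem.List.slice shape (some ((shape.length : Int) - (target_ndim - (marked.length : Int)))) none   -- shape[len(shape)-r:]
  else List.replicate ((target_ndim - (marked.length : Int)) - (shape.length : Int)).toNat 1 ++ shape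

def shape_for_bcast_py_alt (shape : List Int) (target_ndim : Int) (new_axes : List Int) : List Int :=
  shapeBcastGenB (shapeBcastMarkedB shape target_ndim new_axes) (PySem.List.pyRange 0 target_ndim 1)
    (shapeBcastRealB shape target_ndim (shapeBcastMarkedB shape target_ndim new_axes))

-- ===== PRECONDITION & SPEC =====
-- Pre_ excludes exactly the inputs where A raises IndexError: the marking loop runs
-- (len(shape) < target_ndim) and some new_ax is outside [-target_ndim, target_ndim).
def Pre_shape_for_bcast_py (shape : List Int) (target_ndim : Int) (new_axes : List Int) : Prop :=
  (shape.length : Int) < target_ndim → ∀ ax ∈ new_axes, -target_ndim ≤ ax ∧ ax < target_ndim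
instance (shape : List Int) (target_ndim : Int) (new_axes : List Int) : Decidable (Pre_shape_for_bcast_py shape target_ndim new_axes) := by unfold Pre_shape_for_bcast_py; infer_instance

def pvWitness_shape_for_bcast_py : List Int × Int × List Int := ([2, 3], 4, [0, 2])

def Spec_shape_for_bcast_py (shape : List Int) (target_ndim : Int) (new_axes : List Int) (out : List Int) : Prop := out = shape_for_bcast_py_alt shape target_ndim new_axes
instance (shape : List Int) (target_ndim : Int) (new_axes : List Int) (out : List Int) : Decidable (Spec_shape_for_bcast_py shape target_ndim new_axes out) := by unfold Spec_shape_for_bcast_py; infer_instance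

-- ===== CLAIM (what is proved, stated in full; the proofs are below) =====
def Claim_equal_shape_for_bcast_py : Prop := ∀ (shape : List Int) (target_ndim : Int) (new_axes : List Int), Dom_shape_for_bcast_py shape target_ndim new_axes → Pre_shape_for_bcast_py shape target_ndim new_axes → Spec_shape_for_bcast_py shape target_ndim new_axes (shape_for_bcast_py shape target_ndim new_axes)


-- ===== LEMMAS AND PROOFS =====

-- the common fill: marked slots emit their value, unmarked slots consume the real list (1 when exhausted)
def shapeFill : List (Option Int) → List Int → List Int
  | [], _ => []
  | some v :: t, r => v :: shapeFill t r
  | none :: t, r => r.headD 1 :: shapeFill t r.tail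

def cNone (t : List (Option Int)) : Nat := t.countP (fun o => o.isNone)

def realOf (u : Nat) (s : List Int) : List Int :=
  List.replicate (u - min u s.length) 1 ++ (s.take u).reverse

theorem cNone_cons_some (v : Int) (t : List (Option Int)) : cNone (some v :: t) = cNone t := by
  simp [cNone]
theorem cNone_cons_none (t : List (Option Int)) : cNone (none :: t) = cNone t + 1 := by
  simp [cNone]
theorem cNone_reverse (t : List (Option Int)) : cNone t.reverse = cNone t := by
  simp [cNone]

theorem length_shapeFill (t : List (Option Int)) (r : List Int) : (shapeFill t r).length = t.length := by
  induction t generalizing r with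
  | nil => rfl
  | cons a t ih => cases a <;> simp [shapeFill, ih]

theorem length_realOf (u : Nat) (s : List Int) : (realOf u s).length = u := by
  simp [realOf]

theorem shapeFill_append (t₁ t₂ : List (Option Int)) (r : List Int) :
    shapeFill (t₁ ++ t₂) r = shapeFill t₁ r ++ shapeFill t₂ (r.drop (cNone t₁)) := by
  induction t₁ generalizing r with
  | nil => simp [shapeFill, cNone]
  | cons a t ih =>
    cases a with
    | some v => simp [shapeFill, ih, cNone_cons_some]
    | none => simp [shapeFill, ih, cNone_cons_none, List.drop_tail]

theorem shapeFill_take (t : List (Option Int)) (r : List Int) :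
    shapeFill t r = shapeFill t (r.take (cNone t)) := by
  induction t generalizing r with
  | nil => rfl
  | cons a t ih =>
    cases a with
    | some v =>
      simp only [shapeFill, cNone_cons_some]
      exact congrArg _ (ih r)
    | none =>
      cases r with
      | nil => simp [shapeFill, cNone_cons_none]
      | cons x r' =>
        simp only [shapeFill, cNone_cons_none, List.take_succ_cons, List.headD_cons, List.tail_cons]
        exact congrArg _ (ih r')

theorem realOf_succ (u : Nat) (s : List Int) :
    realOf (u + 1) s = realOf u s.tail ++ [s.headD 1] := by
  cases s with
  | nil =>
    simp [realOf, List.replicate_succ']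
  | cons x s' =>
    simp only [realOf, List.tail_cons, List.headD_cons, List.length_cons, List.take_succ_cons,
      List.reverse_cons]
    rw [show (u + 1 - min (u + 1) (s'.length + 1)) = u - min u s'.length by omega]
    simp [List.append_assoc]

-- A's backward fill, read forwards: reversing the template and the shape
theorem shapeFill_reverse (t : List (Option Int)) (s : List Int) :
    (shapeFill t s).reverse = shapeFill t.reverse (realOf (cNone t) s) := by
  induction t generalizing s with
  | nil => rfl
  | cons a t ih =>
    cases a with
    | some v =>
      rw [show ((some v :: t).reverse) = t.reverse ++ [some v] by simp]
      rw [shapeFill_append, cNone_reverse, cNone_cons_some]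
      simp [shapeFill, ih]
    | none =>
      rw [show ((none :: t).reverse) = t.reverse ++ [none] by simp]
      rw [shapeFill_append, cNone_reverse, cNone_cons_none, realOf_succ]
      have hlen : (realOf (cNone t) s.tail).length = cNone t := length_realOf _ _
      rw [show shapeFill t.reverse (realOf (cNone t) s.tail ++ [s.headD 1])
            = shapeFill t.reverse (realOf (cNone t) s.tail) by
        rw [shapeFill_take t.reverse, cNone_reverse, List.take_left' hlen]]
      rw [List.drop_left' hlen]
      simp [shapeFill, ih]


theorem pySetD_neg_natCast' {α : Type} (xs : List α) (k : Nat) (v : α) (h0 : 0 < k) (h1 : k ≤ xs.length) :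
    PySem.List.pySetD xs (-(k:Int)) v = xs.set (xs.length - k) v := by
  simp only [PySem.List.pySetD, PySem.List.pySet?, PySem.List.pyIdx?]
  rw [if_neg (by omega), if_pos (by omega)]
  simp only [Option.map_some, Option.getD_some]
  congr 1
  omega

-- one step of A's backward loop, at template position pre.length (ax = k+1 from the back)
theorem stepA (shape : List Int) (pre : List (Option Int)) (a : Option Int) (suf' : List (Option Int)) (k : Nat) (hk : suf'.length = k) :
    shapeBcastBodyA shape
      ((pre ++ [a]) ++ (shapeFill suf'.reverse shape.reverse).reverse.map some,
       1 + (min (cNone suf') shape.length : Int)) ((k:Int)+1)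
    = (pre ++ (shapeFill (a :: suf').reverse shape.reverse).reverse.map some,
       1 + (min (cNone (a :: suf')) shape.length : Int)) := by
  have hX : ((shapeFill suf'.reverse shape.reverse).reverse.map some).length = k := by
    simp [length_shapeFill, hk]
  have hlen : ((pre ++ [a]) ++ (shapeFill suf'.reverse shape.reverse).reverse.map some).length
      = pre.length + 1 + k := by simp [length_shapeFill, hk]; omega
  have hidx : ((pre ++ [a]) ++ (shapeFill suf'.reverse shape.reverse).reverse.map some).length - (k+1) = pre.length := by omega
  have hq : ((pre ++ [a]) ++ (shapeFill suf'.reverse shape.reverse).reverse.map some)[pre.length]? = some a := by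
    rw [List.getElem?_append_left (by simp)]
    exact List.getElem?_concat_length
  have hread : PySem.List.pyGetD ((pre ++ [a]) ++ (shapeFill suf'.reverse shape.reverse).reverse.map some) (-((k:Int)+1)) none = a := by
    rw [show (-((k:Int)+1)) = (-((k+1 : Nat) : Int)) by push_cast; ring]
    rw [PySem.List.pyGetD_neg_natCast _ (k+1) none (by omega) (by omega)]
    exact Option.some.inj ((List.getElem?_eq_getElem (by omega)).symm.trans (by rw [hidx]; exact hq))
  have hset : ∀ (b : Option Int), ((pre ++ [a]) ++ (shapeFill suf'.reverse shape.reverse).reverse.map some).set pre.length b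
      = (pre ++ [b]) ++ (shapeFill suf'.reverse shape.reverse).reverse.map some := by
    intro b
    rw [List.set_append, if_pos (by simp), List.set_append, if_neg (lt_irrefl _)]
    simp
  simp only [shapeBcastBodyA]
  rw [hread]
  cases a with
  | some v =>
    rw [if_neg (by simp)]
    rw [show (some v :: suf').reverse = suf'.reverse ++ [some v] by simp, shapeFill_append]
    simp [shapeFill, cNone_cons_some, List.append_assoc]
  | none =>
    rw [if_pos rfl]
    rw [show (none :: suf').reverse = suf'.reverse ++ [none] by simp, shapeFill_append,
      cNone_reverse, cNone_cons_none]
    by_cases hc : cNone suf' < shape.length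
    · have hm : min (cNone suf') shape.length = cNone suf' := by omega
      rw [show (-(1 + (min ((cNone suf' : Nat) : Int) ((shape.length : Nat) : Int)))) = (-((cNone suf' + 1 : Nat) : Int)) by push_cast; omega]
      rw [PySem.List.pyGet?_neg_natCast shape (cNone suf' + 1) (by omega) (by omega)]
      rw [List.getElem?_eq_getElem (by omega)]
      simp only []
      rw [show (-((k:Int)+1)) = (-((k+1 : Nat) : Int)) by push_cast; ring]
      rw [pySetD_neg_natCast' _ (k+1) _ (by omega) (by omega), hidx, hset]
      rw [List.drop_eq_getElem_cons (by simpa using hc)]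
      simp only [Prod.mk.injEq]
      constructor
      · rw [show shapeFill [none] (shape.reverse[cNone suf']'(by simpa using hc) :: List.drop (cNone suf' + 1) shape.reverse) = [shape.reverse[cNone suf']'(by simpa using hc)] from rfl]
        rw [List.getElem_reverse]
        simp only [show shape.length - 1 - cNone suf' = shape.length - (cNone suf' + 1) from by omega]
        simp [List.append_assoc]
      · push_cast; omega
    · have hm : min (cNone suf') shape.length = shape.length := by omega
      rw [show (-(1 + (min ((cNone suf' : Nat) : Int) ((shape.length : Nat) : Int)))) = (-(1 + (shape.length : Int))) by omega]
      rw [(PySem.List.pyGet?_eq_none_iff _ _).mpr (by unfold PySem.Raise.InRange; omega)]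
      simp only []
      rw [show (-((k:Int)+1)) = (-((k+1 : Nat) : Int)) by push_cast; ring]
      rw [pySetD_neg_natCast' _ (k+1) _ (by omega) (by omega), hidx, hset]
      rw [List.drop_eq_nil_of_le (by rw [List.length_reverse]; omega)]
      simp only [Prod.mk.injEq]
      constructor
      · rw [show shapeFill [none] ([] : List Int) = [1] from rfl]
        simp [List.append_assoc]
      · push_cast; omega


theorem pySetD_neg' {α : Type} (xs : List α) (i : Int) (v : α) (h0 : i < 0) (h1 : -(xs.length:Int) ≤ i) :
    PySem.List.pySetD xs i v = xs.set ((xs.length:Int) + i).toNat v := by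
  simp only [PySem.List.pySetD, PySem.List.pySet?, PySem.List.pyIdx?]
  rw [if_neg (by omega), if_pos (by omega)]
  simp only [Option.map_some, Option.getD_some]
  congr 1
  omega

-- A's whole backward loop
theorem loopA (shape : List Int) (k : Nat) : ∀ (pre suf : List (Option Int)), suf.length = k →
    (PySem.List.pyRange 1 ((k : Int) + 1) 1).foldl (shapeBcastBodyA shape) (pre ++ suf, 1)
      = (pre ++ ((shapeFill suf.reverse shape.reverse).reverse.map some),
         1 + min ((cNone suf : Nat) : Int) ((shape.length : Nat) : Int)) := by
  induction k with
  | zero =>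
    intro pre suf h
    rw [List.eq_nil_of_length_eq_zero h]
    rw [PySem.List.pyRange_one_eq_nil (by omega)]
    simp [shapeFill, cNone]
  | succ k ih =>
    intro pre suf h
    match suf, h with
    | a :: suf', h =>
    have hlen : suf'.length = k := by simpa using h
    rw [show (((k+1:Nat)):Int) + 1 = ((k:Int)+1) + 1 by push_cast; ring]
    rw [PySem.List.pyRange_one_succ_right (by omega), List.foldl_append]
    rw [show pre ++ a :: suf' = (pre ++ [a]) ++ suf' by simp]
    rw [ih (pre ++ [a]) suf' hlen]
    simp only [List.foldl_cons, List.foldl_nil]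
    exact stepA shape pre a suf' k hlen

theorem length_foldl_pySetD (l : List Int) : ∀ (ns : List (Option Int)),
    (l.foldl (fun ns ax => PySem.List.pySetD ns ax (some 1)) ns).length = ns.length := by
  induction l with
  | nil => intro ns; rfl
  | cons a l ih => intro ns; rw [List.foldl_cons, ih, PySem.List.length_pySetD]

theorem length_markA (shape : List Int) (t : Int) (axes : List Int) :
    (shapeBcastMarkA shape t axes).length = t.toNat := by
  unfold shapeBcastMarkA
  split
  · rw [length_foldl_pySetD, List.length_replicate]
  · rw [List.length_replicate]

-- A's result as the forward fill of the marked template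
theorem A_eq_fill (shape : List Int) (t : Int) (axes : List Int) :
    shape_for_bcast_py shape t axes
      = shapeFill (shapeBcastMarkA shape t axes)
          (realOf (cNone (shapeBcastMarkA shape t axes)) shape.reverse) := by
  unfold shape_for_bcast_py
  have h1 : t + 1 = ((t.toNat : Nat) : Int) + 1 ∨ t + 1 ≤ 1 := by omega
  have hloop := loopA shape t.toNat [] (shapeBcastMarkA shape t axes) (length_markA shape t axes)
  rcases h1 with h1 | h1
  · rw [List.nil_append] at hloop
    rw [h1, hloop]
    simp only [List.nil_append]
    rw [List.map_map]
    rw [show ((fun o : Option Int => o.getD 1) ∘ some) = id by funext x; rfl, List.map_id]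
    rw [show (shapeFill (shapeBcastMarkA shape t axes).reverse shape.reverse).reverse
        = shapeFill (shapeBcastMarkA shape t axes).reverse.reverse
            (realOf (cNone (shapeBcastMarkA shape t axes).reverse) shape.reverse) from
      shapeFill_reverse _ _]
    rw [List.reverse_reverse, cNone_reverse]
  · -- t < 0: the template is empty and the loop range is empty
    have hm : (shapeBcastMarkA shape t axes) = [] :=
      List.eq_nil_of_length_eq_zero (by rw [length_markA]; omega)
    rw [PySem.List.pyRange_one_eq_nil h1, hm]
    rfl

-- the marking fold builds the membership template of the normalized positions
theorem markFold (n : Int) (hn : 0 < n) : ∀ (l : List Int), (∀ ax ∈ l, -n ≤ ax ∧ ax < n) →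
    l.foldl (fun ns ax => PySem.List.pySetD ns ax (some (1:Int))) (List.replicate n.toNat (none : Option Int))
    = (List.range n.toNat).map (fun (i : Nat) => if (i:Int) ∈ l.map (fun ax => PySem.Int.mod ax n) then some (1:Int) else none) := by
  intro l
  induction l using List.reverseRecOn with
  | nil => simp [List.map_const']
  | append_singleton l ax ih =>
    intro hb
    have hbl : ∀ a ∈ l, -n ≤ a ∧ a < n := fun a ha => hb a (by simp [ha])
    have hbx : -n ≤ ax ∧ ax < n := hb ax (by simp)
    rw [List.foldl_append, List.foldl_cons, List.foldl_nil, ih hbl]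
    have hmodx : PySem.Int.mod ax n = if 0 ≤ ax then ax else ax + n := by
      rw [PySem.Int.mod_eq_emod_of_pos hn]
      by_cases hx : 0 ≤ ax
      · rw [if_pos hx]
        exact Int.emod_eq_of_lt hx hbx.2
      · rw [if_neg hx]
        have h3 : (ax + n) % n = ax % n := by simp
        rw [← h3]
        exact Int.emod_eq_of_lt (by omega) (by omega)
    have hset : PySem.List.pySetD ((List.range n.toNat).map
          (fun (i : Nat) => if (i:Int) ∈ l.map (fun a => PySem.Int.mod a n) then some (1:Int) else none)) ax (some (1:Int))
        = ((List.range n.toNat).map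
          (fun (i : Nat) => if (i:Int) ∈ l.map (fun a => PySem.Int.mod a n) then some (1:Int) else none)).set
            (PySem.Int.mod ax n).toNat (some (1:Int)) := by
      by_cases hx : 0 ≤ ax
      · rw [PySem.List.pySetD_of_nonneg _ _ hx, hmodx, if_pos hx]
      · rw [pySetD_neg' _ _ _ (by omega) (by simp; omega)]
        congr 1
        rw [hmodx, if_neg hx]
        simp only [List.length_map, List.length_range]
        omega
    rw [hset]
    apply List.ext_getElem
    · simp
    · intro i h1 h2
      simp only [List.getElem_set, List.getElem_map, List.getElem_range]
      have hmnn : 0 ≤ PySem.Int.mod ax n := PySem.Int.mod_nonneg ax hn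
      by_cases hij : (PySem.Int.mod ax n).toNat = i
      · rw [if_pos hij, if_pos (by
          simp only [List.map_append, List.mem_append, List.map_cons, List.map_nil,
            List.mem_singleton]
          right
          omega)]
      · rw [if_neg hij]
        have hne : ¬((i:Int) = PySem.Int.mod ax n) := by omega
        have hmem : ((i:Int) ∈ (l ++ [ax]).map (fun a => PySem.Int.mod a n))
            ↔ ((i:Int) ∈ l.map (fun a => PySem.Int.mod a n)) := by
          simp [hne]
        by_cases hmi : (i:Int) ∈ l.map (fun a => PySem.Int.mod a n)
        · rw [if_pos hmi, if_pos (hmem.mpr hmi)]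
        · rw [if_neg hmi, if_neg (fun h => hmi (hmem.mp h))]

-- the template over B's marked set
theorem mark_eq (shape : List Int) (t : Int) (axes : List Int)
    (hPre : Pre_shape_for_bcast_py shape t axes) :
    shapeBcastMarkA shape t axes
      = (List.range t.toNat).map (fun (i : Nat) => if (i:Int) ∈ shapeBcastMarkedB shape t axes then some 1 else none) := by
  unfold shapeBcastMarkA shapeBcastMarkedB
  by_cases h : (shape.length : Int) < t
  · rw [if_pos h, if_pos h]
    have hn : 0 < t := by
      have := Int.natCast_nonneg shape.length
      omega
    rw [markFold t hn axes (hPre h)]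
    apply List.map_congr_left
    intro i _
    by_cases hm : (i:Int) ∈ axes.map (fun ax => PySem.Int.mod ax t)
    · rw [if_pos hm, if_pos ((PySem.Set.mem_ofList _ _).mpr hm)]
    · rw [if_neg hm, if_neg (fun h' => hm ((PySem.Set.mem_ofList _ _).mp h'))]
  · rw [if_neg h, if_neg h]
    rw [show (PySem.Set.empty : PySem.Set Int) = [] from rfl]
    simp [List.map_const']

-- B's generator as the forward fill of the membership template
theorem genB_eq_fill (marked : PySem.Set Int) : ∀ (is : List Int) (real : List Int),
    shapeBcastGenB marked is real
      = shapeFill (is.map (fun i => if PySem.Set.contains marked i then some 1 else none)) real := by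
  intro is
  induction is with
  | nil => intro real; rfl
  | cons i is ih =>
    intro real
    by_cases hm : PySem.Set.contains marked i = true
    · have hm' : i ∈ marked := (PySem.Set.contains_iff _ _).mp hm
      simp [shapeBcastGenB, hm', shapeFill, ih]
    · have hm' : i ∉ marked := fun h => hm ((PySem.Set.contains_iff _ _).mpr h)
      cases real with
      | nil => simp [shapeBcastGenB, hm', shapeFill, ih]
      | cons v rest => simp [shapeBcastGenB, hm', shapeFill, ih]

theorem countP_or_disjoint {β : Type} (p q : β → Bool) : ∀ (l : List β), (∀ x ∈ l, ¬(p x = true ∧ q x = true)) →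
    l.countP (fun x => p x || q x) = l.countP p + l.countP q := by
  intro l
  induction l with
  | nil => intro _; rfl
  | cons a l ih =>
    intro h
    have ha := h a (by simp)
    have hl : ∀ x ∈ l, ¬(p x = true ∧ q x = true) := fun x hx => h x (by simp [hx])
    simp only [List.countP_cons, ih hl]
    by_cases hp : p a = true
    · by_cases hq : q a = true
      · exact absurd ⟨hp, hq⟩ ha
      · simp [hp, hq]
        omega
    · by_cases hq : q a = true
      · simp [hp, hq]
        omega
      · simp [hp, hq]

theorem countP_range_single (a : Int) : ∀ (m : Nat),
    (List.range m).countP (fun (i : Nat) => decide ((i:Int) = a)) = if 0 ≤ a ∧ a < (m:Int) then 1 else 0 := by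
  intro m
  induction m with
  | zero =>
    simp only [List.range_zero, List.countP_nil]
    rw [if_neg (by omega)]
  | succ m ih =>
    rw [List.range_succ, List.countP_append, ih]
    simp only [List.countP_cons, List.countP_nil]
    by_cases h : (m:Int) = a
    · have hc1 : ¬(0 ≤ a ∧ a < (m:Int)) := by omega
      have hc2 : 0 ≤ a ∧ a < ((m+1:Nat):Int) := by push_cast; omega
      rw [if_neg hc1, if_pos hc2]
      simp [h]
    · rw [show (decide ((m:Int) = a)) = false by simp [h]]
      by_cases h2 : 0 ≤ a ∧ a < (m:Int)
      · have hc2 : 0 ≤ a ∧ a < ((m+1:Nat):Int) := by push_cast; omega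
        rw [if_pos h2, if_pos hc2]
        simp
      · have hc2 : ¬(0 ≤ a ∧ a < ((m+1:Nat):Int)) := by push_cast; omega
        rw [if_neg h2, if_neg hc2]
        simp

theorem countP_range_mem : ∀ (l : List Int) (m : Nat), l.Nodup → (∀ x ∈ l, 0 ≤ x ∧ x < (m:Int)) →
    (List.range m).countP (fun (i : Nat) => decide ((i:Int) ∈ l)) = l.length := by
  intro l
  induction l with
  | nil => intro m _ _; simp
  | cons a l ih =>
    intro m hnd hb
    have ha : a ∉ l := (List.nodup_cons.mp hnd).1
    have hnd' := (List.nodup_cons.mp hnd).2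
    have hba := hb a (by simp)
    have hbl : ∀ x ∈ l, 0 ≤ x ∧ x < (m:Int) := fun x hx => hb x (by simp [hx])
    have hfun : (fun i : Nat => decide ((i:Int) ∈ a :: l))
        = fun i : Nat => (decide ((i:Int) = a) || decide ((i:Int) ∈ l)) := by
      funext i
      simp [List.mem_cons]
    rw [hfun, countP_or_disjoint _ _ _ (by
      intro x _ hx
      have h1 := of_decide_eq_true hx.1
      have h2 := of_decide_eq_true hx.2
      exact ha (h1 ▸ h2))]
    rw [countP_range_single, ih m hnd' hbl, if_pos (by omega)]
    simp
    omega

theorem cNone_template (m : Nat) (res : List Int) (hnd : res.Nodup)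
    (hb : ∀ x ∈ res, 0 ≤ x ∧ x < (m:Int)) :
    cNone ((List.range m).map (fun (i:Nat) => if (i:Int) ∈ res then some 1 else none)) = m - res.length := by
  unfold cNone
  rw [List.countP_map]
  have hfun : ((fun o : Option Int => o.isNone) ∘ (fun (i:Nat) => if (i:Int) ∈ res then some 1 else none))
      = fun i : Nat => !(decide ((i:Int) ∈ res)) := by
    funext i
    by_cases h : (i:Int) ∈ res <;> simp [h]
  rw [hfun]
  have h1 := countP_range_mem res m hnd hb
  have h3 := List.length_eq_countP_add_countP (l := List.range m) (p := fun i : Nat => decide ((i:Int) ∈ res))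
  rw [List.length_range] at h3
  have hfun2 : (fun i : Nat => decide (¬ (decide ((i:Int) ∈ res)) = true))
      = fun i : Nat => !(decide ((i:Int) ∈ res)) := by
    funext i
    by_cases h : (i:Int) ∈ res <;> simp [h]
  rw [hfun2] at h3
  omega

-- ===== VERDICT (by name: the statement is the Claim_ definition above) =====
theorem shape_for_bcast_py_spec : Claim_equal_shape_for_bcast_py := by
  unfold Claim_equal_shape_for_bcast_py
  intro shape t axes _ hPre
  unfold Spec_shape_for_bcast_py
  by_cases ht : t < 0
  · -- target_ndim < 0: both sides are the empty tuple
    have hA : shape_for_bcast_py shape t axes = [] := by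
      unfold shape_for_bcast_py
      rw [PySem.List.pyRange_one_eq_nil (by omega),
        List.eq_nil_of_length_eq_zero (l := shapeBcastMarkA shape t axes) (by rw [length_markA]; omega)]
      rfl
    have hB : shape_for_bcast_py_alt shape t axes = [] := by
      unfold shape_for_bcast_py_alt
      rw [PySem.List.pyRange_one_eq_nil (by omega)]
      rfl
    rw [hA, hB]
  · rw [Int.not_lt] at ht
    rw [A_eq_fill, mark_eq shape t axes hPre]
    unfold shape_for_bcast_py_alt
    rw [show PySem.List.pyRange 0 t 1 = (List.range t.toNat).map (fun k : Nat => (k : Int)) from by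
      rw [show t = ((t.toNat : Nat) : Int) from by omega]
      exact PySem.List.pyRange_zero_nat t.toNat]
    rw [genB_eq_fill, List.map_map]
    have htmpl : (List.map ((fun i => if PySem.Set.contains (shapeBcastMarkedB shape t axes) i then some (1:Int) else none) ∘ (fun k : Nat => (k:Int))) (List.range t.toNat))
        = (List.range t.toNat).map (fun (i:Nat) => if (i:Int) ∈ shapeBcastMarkedB shape t axes then some (1:Int) else none) := by
      apply List.map_congr_left
      intro i _
      simp only [Function.comp]
      by_cases h : (i:Int) ∈ shapeBcastMarkedB shape t axes
      · rw [if_pos ((PySem.Set.contains_iff _ _).mpr h), if_pos h]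
      · rw [if_neg (by rw [PySem.Set.contains_iff]; exact h), if_neg h]
    rw [htmpl]
    congr 1
    -- the real-slot values coincide
    have hnd : (shapeBcastMarkedB shape t axes).Nodup := by
      unfold shapeBcastMarkedB
      split
      · exact PySem.Set.nodup_ofList _
      · exact List.nodup_nil
    have hbM : ∀ x ∈ shapeBcastMarkedB shape t axes, 0 ≤ x ∧ x < ((t.toNat : Nat) : Int) := by
      unfold shapeBcastMarkedB
      intro x hx
      split at hx
      · rename_i hlt
        have hn : 0 < t := by
          have := Int.natCast_nonneg shape.length
          omega
        rw [PySem.Set.mem_ofList] at hx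
        obtain ⟨ax, _, rfl⟩ := List.mem_map.mp hx
        refine ⟨PySem.Int.mod_nonneg ax hn, ?_⟩
        have := PySem.Int.mod_lt ax hn
        omega
      · simp [PySem.Set.empty] at hx
    rw [cNone_template _ _ hnd hbM]
    have hklen : (shapeBcastMarkedB shape t axes).length ≤ t.toNat := by
      have h1 := countP_range_mem (shapeBcastMarkedB shape t axes) t.toNat hnd hbM
      have h2 := List.countP_le_length (p := fun i : Nat => decide ((i:Int) ∈ shapeBcastMarkedB shape t axes)) (l := List.range t.toNat)
      rw [List.length_range] at h2
      omega
    unfold shapeBcastRealB realOf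
    by_cases h0 : t - ((shapeBcastMarkedB shape t axes).length : Int) ≤ 0
    · rw [if_pos h0]
      rw [show t.toNat - (shapeBcastMarkedB shape t axes).length = 0 from by omega]
      simp
    · rw [if_neg h0]
      by_cases h1 : t - ((shapeBcastMarkedB shape t axes).length : Int) ≤ (shape.length:Int)
      · rw [if_pos h1]
        rw [show (shape.length:Int) - (t - ((shapeBcastMarkedB shape t axes).length : Int))
            = (((shape.length - (t.toNat - (shapeBcastMarkedB shape t axes).length)) : Nat) : Int) from by omega]
        rw [PySem.List.slice_from_natCast]
        rw [List.take_reverse, List.reverse_reverse]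
        rw [show t.toNat - (shapeBcastMarkedB shape t axes).length
              - min (t.toNat - (shapeBcastMarkedB shape t axes).length) shape.reverse.length = 0 from by
          rw [List.length_reverse]
          omega]
        simp
      · rw [if_neg h1]
        rw [List.take_of_length_le (by rw [List.length_reverse]; omega), List.reverse_reverse]
        congr 1
        rw [show min (t.toNat - (shapeBcastMarkedB shape t axes).length) shape.reverse.length = shape.length from by
          rw [List.length_reverse]
          omega]
        congr 1
        omega
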